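-- pv_equiv track=rewrite | github.com/cmartin-cay/AOC_2022 | day04.py | engulf
-- ===== SOURCE A (Python) =====
-- def engulf(sections):
--     a = list(range(sections[0], sections[1] + 1))
--     b = list(range(sections[2], sections[3] + 1))
--     if len(a) > len(b):
--         long, short = a, b
--     else:
--         long, short = b, a
--     return 1 if all([elem in long for elem in short]) else 0
-- ===== SOURCE B (Python) =====
-- def engulf(sections):
--     s0, e0 = sections[0], sections[1]
--     s1, e1 = sections[2], sections[3]
--     first_in_second = e0 < s0 or (s1 <= s0 and e0 <= e1)
--     second_in_first = e1 < s1 or (s0 <= s1 and e1 <= e0)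
--     return 1 if first_in_second or second_in_first else 0
-- ===== Notes on version B (the rewrite author's own statement) =====
-- stated objective: simpler
-- what changed: B compares the four interval endpoints directly (empty ranges are contained trivially) instead of materialising both ranges as lists, picking the shorter, and testing membership of each of its elements in the longer.
import Mathlib
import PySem

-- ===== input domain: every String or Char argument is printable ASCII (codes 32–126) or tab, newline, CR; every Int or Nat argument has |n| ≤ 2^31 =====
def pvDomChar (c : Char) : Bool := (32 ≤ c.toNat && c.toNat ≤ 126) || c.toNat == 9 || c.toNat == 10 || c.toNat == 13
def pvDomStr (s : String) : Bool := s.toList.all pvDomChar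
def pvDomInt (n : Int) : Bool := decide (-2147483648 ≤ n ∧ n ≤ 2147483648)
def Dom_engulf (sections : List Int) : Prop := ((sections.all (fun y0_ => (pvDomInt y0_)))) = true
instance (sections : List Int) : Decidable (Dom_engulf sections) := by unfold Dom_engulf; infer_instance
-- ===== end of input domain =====

-- B replaces A's materialised ranges and element-by-element membership scan by a direct
-- comparison of the four interval endpoints (objective: simpler).


-- ===== PORT A =====
def engulf (sections : List Int) : Int :=
  match PySem.List.pyGet? sections 0, PySem.List.pyGet? sections 1,
        PySem.List.pyGet? sections 2, PySem.List.pyGet? sections 3 with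
  | some i0, some i1, some i2, some i3 =>
    let a := PySem.List.pyRange i0 (i1 + 1) 1
    let b := PySem.List.pyRange i2 (i3 + 1) 1
    let p := if a.length > b.length then (a, b) else (b, a)
    if p.2.all (fun elem => p.1.contains elem) then 1 else 0
  | _, _, _, _ => 0   -- IndexError in Python; excluded by Pre_engulf

-- ===== PORT B =====
def engulf_alt (sections : List Int) : Int :=
  match PySem.List.pyGet? sections 0 with
  | none => 0   -- IndexError in Python; excluded by Pre_engulf
  | some s0 =>
    match PySem.List.pyGet? sections 1 with
    | none => 0
    | some e0 =>
      match PySem.List.pyGet? sections 2 with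
      | none => 0
      | some s1 =>
        match PySem.List.pyGet? sections 3 with
        | none => 0
        | some e1 =>
          let first_in_second : Prop := e0 < s0 ∨ (s1 ≤ s0 ∧ e0 ≤ e1)
          let second_in_first : Prop := e1 < s1 ∨ (s0 ≤ s1 ∧ e1 ≤ e0)
          if first_in_second ∨ second_in_first then 1 else 0

-- ===== PRECONDITION & SPEC =====
-- Pre_ excludes only lists with fewer than 4 elements, where A raises IndexError.
def Pre_engulf (sections : List Int) : Prop := 4 ≤ sections.length
instance (sections : List Int) : Decidable (Pre_engulf sections) := by unfold Pre_engulf; infer_instance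
def pvWitness_engulf : List Int := [2, 8, 3, 7]
def Spec_engulf (sections : List Int) (out : Int) : Prop := out = engulf_alt sections
instance (sections : List Int) (out : Int) : Decidable (Spec_engulf sections out) := by unfold Spec_engulf; infer_instance

-- ===== CLAIM (what is proved, stated in full; the proofs are below) =====
def Claim_equal_engulf : Prop := ∀ (sections : List Int), Dom_engulf sections → Pre_engulf sections → Spec_engulf sections (engulf sections)

-- ===== LEMMAS AND PROOFS =====

-- one integer range is elementwise contained in another iff it is empty or its endpoints are bounded
theorem pv_all_sub (a b c d : Int) :
    ((PySem.List.pyRange a b 1).all (fun e => (PySem.List.pyRange c d 1).contains e))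
      = (decide (b ≤ a ∨ (c ≤ a ∧ b ≤ d))) := by
  rw [Bool.eq_iff_iff]
  simp only [List.all_eq_true, List.contains_eq_mem, PySem.List.mem_pyRange_one,
    decide_eq_true_eq]
  constructor
  · intro h
    by_cases hb : b ≤ a
    · exact Or.inl hb
    · right
      have h1 := h a ⟨le_refl _, by omega⟩
      have h2 := h (b - 1) ⟨by omega, by omega⟩
      omega
  · rintro (h | h) x ⟨hx1, hx2⟩ <;> constructor <;> omega

-- ===== VERDICT (by name: the statement is the Claim_ definition above) =====
theorem engulf_spec : Claim_equal_engulf := by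
  intro sections _ hpre
  unfold Pre_engulf at hpre
  match sections, hpre with
  | i0 :: i1 :: i2 :: i3 :: rest, _ =>
    unfold Spec_engulf engulf engulf_alt
    have h0 : PySem.List.pyGet? (i0 :: i1 :: i2 :: i3 :: rest) 0 = some i0 := by
      simp [PySem.List.pyGet?, PySem.List.pyIdx?]; rw [if_pos (by omega)]; simp
    have h1 : PySem.List.pyGet? (i0 :: i1 :: i2 :: i3 :: rest) 1 = some i1 := by
      simp [PySem.List.pyGet?, PySem.List.pyIdx?]; rw [if_pos (by omega)]; simp
    have h2 : PySem.List.pyGet? (i0 :: i1 :: i2 :: i3 :: rest) 2 = some i2 := by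
      simp [PySem.List.pyGet?, PySem.List.pyIdx?]; rw [if_pos (by omega)]; simp
    have h3 : PySem.List.pyGet? (i0 :: i1 :: i2 :: i3 :: rest) 3 = some i3 := by
      simp [PySem.List.pyGet?, PySem.List.pyIdx?]; rw [if_pos (by omega)]; simp
    rw [h0, h1, h2, h3]
    simp only [PySem.List.length_pyRange_one, gt_iff_lt]
    by_cases hlen : (i3 + 1 - i2).toNat < (i1 + 1 - i0).toNat
    · rw [if_pos hlen]
      simp only [pv_all_sub, decide_eq_true_eq]
      split_ifs <;> omega
    · rw [if_neg hlen]
      simp only [pv_all_sub, decide_eq_true_eq]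
      split_ifs <;> omega
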